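-- pv_equiv track=rewrite | github.com/VuKhang-lsts/vn-edu-ocr-demo | src/postprocess_vi.py | _case_style
-- ===== SOURCE A (Python) =====
-- from typing import Dict, List, Tuple, Optional, Iterable
--
-- def _case_style(words: List[str]) -> str:
--     """Detect span casing: UPPER / TITLE / LOWER / MIXED."""
--     ws = [w for w in words if w]
--     if not ws:
--         return "MIXED"
--     if all(w.isupper() for w in ws):
--         return "UPPER"
--     if all(w.islower() for w in ws):
--         return "LOWER"
--     # simple title heuristic
--     if all((w[:1].isupper() and w[1:].islower()) or w.isupper() for w in ws):
--         return "TITLE"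
--     return "MIXED"
-- ===== SOURCE B (Python) =====
-- def _case_style(words):
--     """Detect span casing by per-word character counts and candidate-set intersection."""
--     cands = None  # styles still possible for every nonempty word seen so far
--     for w in words:
--         if not w:
--             continue
--         nu = sum(1 for c in w if c.isupper())
--         nl = sum(1 for c in w if c.islower())
--         tu = sum(1 for c in w[1:] if c.isupper())
--         tl = sum(1 for c in w[1:] if c.islower())
--         up = nu > 0 and nl == 0
--         styles = []
--         if up:
--             styles.append("UPPER")
--         if nl > 0 and nu == 0:
--             styles.append("LOWER")
--         if up or (w[0].isupper() and tl > 0 and tu == 0):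
--             styles.append("TITLE")
--         cands = styles if cands is None else [s for s in cands if s in styles]
--     if cands is None:
--         return "MIXED"
--     for s in ("UPPER", "LOWER", "TITLE"):
--         if s in cands:
--             return s
--     return "MIXED"
-- ===== Notes on version B (the rewrite author's own statement) =====
-- stated objective: alternative
-- what changed: Instead of testing the whole filtered list against three str-method predicates in sequence, B classifies each word once from its upper/lowercase character counts into a per-word list of admissible styles, intersects these candidate lists across words, and returns the highest-priority surviving style.
import Mathlib
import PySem

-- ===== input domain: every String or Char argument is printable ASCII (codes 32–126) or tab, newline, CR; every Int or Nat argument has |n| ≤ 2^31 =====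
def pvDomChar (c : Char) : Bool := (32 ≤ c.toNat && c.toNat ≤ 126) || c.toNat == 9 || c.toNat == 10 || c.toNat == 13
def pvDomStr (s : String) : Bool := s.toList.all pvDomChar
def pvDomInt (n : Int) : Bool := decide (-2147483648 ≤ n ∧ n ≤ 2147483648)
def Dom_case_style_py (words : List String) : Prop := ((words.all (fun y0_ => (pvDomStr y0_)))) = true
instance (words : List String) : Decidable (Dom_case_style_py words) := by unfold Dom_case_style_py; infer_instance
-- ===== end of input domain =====

-- B replaces A's three sequential whole-list predicate scans by a per-word style
-- classification from character counts, intersected across words (alternative decomposition).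

-- shared port of the Python str builtins s.isupper() / s.islower() (exact on the
-- ASCII domain, where the only cased characters are the letters): isupper = some
-- cased char and no lowercase one; islower symmetrically
def pyIsupperL (cs : List Char) : Bool :=
  cs.any (fun c => PySem.Chars.isupper c) && cs.all (fun c => !PySem.Chars.islower c)
def pyIslowerL (cs : List Char) : Bool :=
  cs.any (fun c => PySem.Chars.islower c) && cs.all (fun c => !PySem.Chars.isupper c)

-- ===== PORT A =====
def case_style_py (words : List String) : String :=
  let ws := words.filter (fun w => w != "")
  if ws = [] then "MIXED"
  else if ws.all (fun w => pyIsupperL w.toList) then "UPPER"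
  else if ws.all (fun w => pyIslowerL w.toList) then "LOWER"
  else if ws.all (fun w =>
      (pyIsupperL (PySem.List.slice w.toList none (some 1)) &&
       pyIslowerL (PySem.List.slice w.toList (some 1) none)) || pyIsupperL w.toList) then "TITLE"
  else "MIXED"

-- ===== PORT B =====
-- styles a single nonempty word admits, from its upper/lowercase character counts
-- (only called on nonempty words, so headD's default is never used — Python's w[0])
def wordStyles (w : String) : List String :=
  let cs := w.toList
  let nu := cs.countP (fun c => PySem.Chars.isupper c)
  let nl := cs.countP (fun c => PySem.Chars.islower c)
  let t := PySem.List.slice cs (some 1) none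
  let tu := t.countP (fun c => PySem.Chars.isupper c)
  let tl := t.countP (fun c => PySem.Chars.islower c)
  let up := decide (0 < nu) && decide (nl = 0)
  (if up then ["UPPER"] else []) ++
  (if decide (0 < nl) && decide (nu = 0) then ["LOWER"] else []) ++
  (if up || (PySem.Chars.isupper (cs.headD ' ') && decide (0 < tl) && decide (tu = 0)) then
    ["TITLE"] else [])

def caseFoldB (cands : Option (List String)) (w : String) : Option (List String) :=
  if w == "" then cands
  else
    let styles := wordStyles w
    match cands with
    | none => some styles
    | some cs => some (cs.filter (fun s => styles.contains s))

def case_style_py_alt (words : List String) : String :=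
  match words.foldl caseFoldB none with
  | none => "MIXED"
  | some cands =>
    if cands.contains "UPPER" then "UPPER"
    else if cands.contains "LOWER" then "LOWER"
    else if cands.contains "TITLE" then "TITLE"
    else "MIXED"

-- ===== PRECONDITION & SPEC =====
def Spec_case_style_py (words : List String) (out : String) : Prop := out = case_style_py_alt words
instance (words : List String) (out : String) : Decidable (Spec_case_style_py words out) := by unfold Spec_case_style_py; infer_instance

-- ===== CLAIM (what is proved, stated in full; the proofs are below) =====
def Claim_equal_case_style_py : Prop := ∀ (words : List String), Dom_case_style_py words → Spec_case_style_py words (case_style_py words)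

-- ===== LEMMAS AND PROOFS =====
def pA1 (w : String) : Bool := pyIsupperL w.toList
def pA2 (w : String) : Bool := pyIslowerL w.toList
def pA3 (w : String) : Bool :=
  (pyIsupperL (PySem.List.slice w.toList none (some 1)) &&
   pyIslowerL (PySem.List.slice w.toList (some 1) none)) || pyIsupperL w.toList

theorem anyP_countP (l : List Char) (p : Char → Bool) :
    l.any p = decide (0 < l.countP p) := by
  rcases h : l.any p with _ | _
  · simp only [List.any_eq_false] at h
    have : l.countP p = 0 := List.countP_eq_zero.mpr h
    simp [this]
  · simp only [List.any_eq_true] at h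
    have : 0 < l.countP p := List.countP_pos_iff.mpr h
    simp [this]

theorem allNotP_countP (l : List Char) (p : Char → Bool) :
    l.all (fun c => !p c) = decide (l.countP p = 0) := by
  rcases h : l.all (fun c => !p c) with _ | _
  · simp only [List.all_eq_false] at h
    obtain ⟨c, hc, hpc⟩ := h
    have h0 : l.countP p ≠ 0 := Nat.pos_iff_ne_zero.mp (List.countP_pos_iff.mpr ⟨c, hc, by simpa using hpc⟩)
    simp [h0]
  · simp only [List.all_eq_true] at h
    have : l.countP p = 0 := List.countP_eq_zero.mpr (fun c hc => by simpa using h c hc)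
    simp [this]

theorem upper_not_lower (c : Char) :
    PySem.Chars.isupper c = true → PySem.Chars.islower c = false := by
  simp only [PySem.Chars.isupper, PySem.Chars.islower, Bool.and_eq_true, decide_eq_true_eq,
    Bool.and_eq_false_iff, decide_eq_false_iff_not, Char.le_def]
  rintro ⟨h1, h2⟩
  left
  intro h3
  have := UInt32.le_trans h3 h2
  simp at this

-- per nonempty word, membership in wordStyles is exactly A's three predicates
theorem single_upper (c : Char) :
    (PySem.Chars.isupper c && !PySem.Chars.islower c) = PySem.Chars.isupper c := by
  rcases h : PySem.Chars.isupper c with _ | _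
  · simp
  · simp [upper_not_lower c h]

theorem toList_ne_nil (w : String) (hw : w ≠ "") : w.toList ≠ [] := by
  intro h
  exact hw (by simpa using congrArg String.ofList h)

theorem contains_styles_U (a b c : Bool) :
    ((((if a then ["UPPER"] else []) ++ if b then ["LOWER"] else []) ++
      if c then ["TITLE"] else []) : List String).contains "UPPER" = a := by
  cases a <;> cases b <;> cases c <;> decide

theorem contains_styles_L (a b c : Bool) :
    ((((if a then ["UPPER"] else []) ++ if b then ["LOWER"] else []) ++
      if c then ["TITLE"] else []) : List String).contains "LOWER" = b := by
  cases a <;> cases b <;> cases c <;> decide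

theorem contains_styles_T (a b c : Bool) :
    ((((if a then ["UPPER"] else []) ++ if b then ["LOWER"] else []) ++
      if c then ["TITLE"] else []) : List String).contains "TITLE" = c := by
  cases a <;> cases b <;> cases c <;> decide

theorem wordStyles_upper (w : String) (_hw : w ≠ "") :
    (wordStyles w).contains "UPPER" = pA1 w := by
  unfold wordStyles pA1 pyIsupperL
  dsimp only
  rw [contains_styles_U, anyP_countP, allNotP_countP]

theorem wordStyles_lower (w : String) (_hw : w ≠ "") :
    (wordStyles w).contains "LOWER" = pA2 w := by
  unfold wordStyles pA2 pyIslowerL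
  dsimp only
  rw [contains_styles_L, anyP_countP, allNotP_countP]

theorem wordStyles_title (w : String) (hw : w ≠ "") :
    (wordStyles w).contains "TITLE" = pA3 w := by
  obtain ⟨c, t, h⟩ : ∃ c t, w.toList = c :: t := by
    rcases hl : w.toList with _ | ⟨c, t⟩
    · exact absurd hl (toList_ne_nil w hw)
    · exact ⟨c, t, rfl⟩
  unfold wordStyles pA3 pyIsupperL pyIslowerL
  dsimp only
  rw [h, contains_styles_T]
  rw [PySem.List.slice_from_one]
  have hto : PySem.List.slice (c :: t) none (some 1) = [c] := by
    simpa using PySem.List.slice_to_natCast (c :: t) 1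
  rw [hto]
  simp only [List.any_cons, List.any_nil, List.all_cons, List.all_nil, Bool.or_false,
    Bool.and_true, List.tail_cons, List.headD_cons, single_upper]
  simp only [anyP_countP, allNotP_countP, List.countP_cons]
  rcases hu : PySem.Chars.isupper c with _ | _ <;> rcases hl : PySem.Chars.islower c with _ | _ <;>
    simp [hu, hl, Bool.or_comm]

theorem fold_some (words : List String) (cs : List String) :
    words.foldl caseFoldB (some cs) =
      some (cs.filter (fun s =>
        (words.filter (fun w => w != "")).all (fun w => (wordStyles w).contains s))) := by
  induction words generalizing cs with
  | nil => simp
  | cons w tl ih =>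
    by_cases hw : w = ""
    · subst hw; simp [caseFoldB, ih]
    · have hb : (w != "") = true := by simpa using hw
      simp only [List.foldl_cons, caseFoldB, beq_iff_eq, if_neg hw, List.filter_cons, hb,
        if_pos, ih, List.filter_filter]
      simp [Bool.and_comm]

theorem fold_none (words : List String) :
    words.foldl caseFoldB none =
      match words.filter (fun w => w != "") with
      | [] => none
      | w :: rest => some ((wordStyles w).filter (fun s =>
          rest.all (fun w' => (wordStyles w').contains s))) := by
  induction words with
  | nil => simp
  | cons w tl ih =>
    by_cases hw : w = ""
    · subst hw; simpa [caseFoldB] using ih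
    · have hb : (w != "") = true := by simpa using hw
      simp only [List.foldl_cons, caseFoldB, beq_iff_eq, if_neg hw, List.filter_cons, hb,
        if_pos, fold_some]

theorem all_congr_mem {α : Type} (l : List α) (f g : α → Bool)
    (h : ∀ x ∈ l, f x = g x) : l.all f = l.all g := by
  induction l with
  | nil => rfl
  | cons a tl ih =>
    simp only [List.all_cons, h a (by simp), ih (fun x hx => h x (by simp [hx]))]

theorem contains_filter (l : List String) (p : String → Bool) (a : String) :
    (l.filter p).contains a = (l.contains a && p a) := by
  rcases hp : p a with _ | _ <;> rcases hm : l.contains a with _ | _ <;>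
    simp_all [List.mem_filter]

-- ===== VERDICT (by name: the statement is the Claim_ definition above) =====
theorem case_style_py_spec : Claim_equal_case_style_py := by
  intro words _
  unfold Spec_case_style_py case_style_py case_style_py_alt
  rw [fold_none]
  rcases hf : words.filter (fun w => w != "") with _ | ⟨w, rest⟩
  · simp
  · have hmem : ∀ x ∈ w :: rest, x ≠ "" := by
      intro x hx
      have hx' : x ∈ words.filter (fun w => w != "") := hf ▸ hx
      simpa using (List.mem_filter.mp hx').2
    have hw : w ≠ "" := hmem w (by simp)
    have hrest : ∀ x ∈ rest, x ≠ "" := fun x hx => hmem x (by simp [hx])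
    simp only [contains_filter]
    rw [wordStyles_upper w hw, wordStyles_lower w hw, wordStyles_title w hw,
      all_congr_mem rest _ (fun w => pyIsupperL w.toList)
        (fun x hx => wordStyles_upper x (hrest x hx)),
      all_congr_mem rest _ (fun w => pyIslowerL w.toList)
        (fun x hx => wordStyles_lower x (hrest x hx)),
      all_congr_mem rest _ (fun w =>
          (pyIsupperL (PySem.List.slice w.toList none (some 1)) &&
           pyIslowerL (PySem.List.slice w.toList (some 1) none)) || pyIsupperL w.toList)
        (fun x hx => wordStyles_title x (hrest x hx))]
    simp only [List.all_cons, pA1, pA2, pA3]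
    simp
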